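-- pv_equiv track=rewrite | github.com/Vinojithab17/Programming_Challenge | 48/48.py | find_unique_odd_index
-- ===== SOURCE A (Python) =====
-- def find_unique_odd_index(numbers):
--     Unique_odds = {}  # Dictionary to store the index and value of each unique odd number
--
--     for i, num in enumerate(numbers):
--         if num % 2 == 1:
--             if numbers.count(num) == 1:
--                 Unique_odds [num]= i
--             else: continue
--
--     if len(Unique_odds)>1:
--         keys = Unique_odds.keys()
--         return Unique_odds[max(keys)]
--     elif len(Unique_odds) ==1:
--         first_key = next(iter(Unique_odds))
--         first_value = Unique_odds[first_key]
--         return first_value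
--
--     else: return None
-- ===== SOURCE B (Python) =====
-- def find_unique_odd_index(numbers):
--     # Sort (index, value) pairs by value descending, then scan: the first value
--     # group that is odd and a singleton is the largest unique odd value.
--     pairs = sorted(enumerate(numbers), key=lambda p: p[1], reverse=True)
--     while pairs:
--         idx, v = pairs[0]
--         rest = [p for p in pairs[1:] if p[1] != v]
--         if v % 2 == 1 and len(rest) == len(pairs) - 1:
--             return idx
--         pairs = rest
--     return None
-- ===== Notes on version B (the rewrite author's own statement) =====
-- stated objective: alternative
-- what changed: B sorts the (index, value) pairs by value descending and scans the value groups front to back, returning the stored index of the first group that is odd and a singleton; A instead builds a value-to-index dict with a numbers.count scan per element and branches three ways on its size.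
import Mathlib
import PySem

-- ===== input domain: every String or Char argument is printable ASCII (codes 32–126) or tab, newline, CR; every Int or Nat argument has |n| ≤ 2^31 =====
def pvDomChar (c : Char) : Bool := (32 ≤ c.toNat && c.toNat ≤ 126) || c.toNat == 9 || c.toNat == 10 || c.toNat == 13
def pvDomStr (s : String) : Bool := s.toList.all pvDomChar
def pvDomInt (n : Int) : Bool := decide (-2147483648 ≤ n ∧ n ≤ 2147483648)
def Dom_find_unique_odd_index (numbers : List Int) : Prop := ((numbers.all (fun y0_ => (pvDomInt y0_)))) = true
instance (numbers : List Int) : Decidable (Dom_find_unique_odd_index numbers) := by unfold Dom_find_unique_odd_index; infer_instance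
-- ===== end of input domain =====

-- B replaces A's count-per-element dict build and three-way length branch by a different
-- algorithm: sort the (index, value) pairs by value descending, then scan value groups
-- front to back and return the index of the first group that is odd and a singleton
-- (objective: alternative — sort-then-scan instead of A's dict of count-filtered values).

-- ===== PORT A =====
-- A-side helper: the value→index dict Unique_odds built by A's loop
def fuoi_unique_odds (numbers : List Int) : PySem.Dict Int Int :=
  (PySem.List.enumerate numbers).foldl
    (fun d p =>
      if PySem.Int.mod p.2 2 == 1 then
        if (PySem.List.count numbers p.2 : Int) == 1 then d.insert p.2 p.1 else d
      else d)
    PySem.Dict.empty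

def find_unique_odd_index (numbers : List Int) : Option Int :=
  if (fuoi_unique_odds numbers).size > 1 then
    -- max(keys) cannot fail here (size > 1); the `none` arm is a totality guard only
    match PySem.List.max? (PySem.Dict.keys (fuoi_unique_odds numbers)) (fun x => x) with
    | some m => (fuoi_unique_odds numbers).get? m
    | none => none
  else if (fuoi_unique_odds numbers).size = 1 then
    -- next(iter(Unique_odds)) = first key
    match (PySem.Dict.keys (fuoi_unique_odds numbers)).head? with
    | some k => (fuoi_unique_odds numbers).get? k
    | none => none
  else none

-- ===== PORT B =====
-- B-side helpers: the descending-sorted (index, value) pairs, and the while-loop scan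
def fuoi_pairs (numbers : List Int) : List (Int × Int) :=
  PySem.List.sorted (PySem.List.enumerate numbers) (fun p => p.2) true

def fuoi_scan : List (Int × Int) → Option Int
  | [] => none
  | (idx, v) :: tl =>
    -- rest = [p for p in pairs[1:] if p[1] != v]
    if PySem.Int.mod v 2 == 1
        && (tl.filter (fun p => decide (p.2 ≠ v))).length == tl.length then some idx
    else fuoi_scan (tl.filter (fun p => decide (p.2 ≠ v)))
termination_by l => l.length
decreasing_by
  simp only [List.length_unattach, List.length_cons]
  exact Nat.lt_succ_of_le (le_trans (List.length_filter_le _ _) (by simp))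

def find_unique_odd_index_alt (numbers : List Int) : Option Int :=
  fuoi_scan (fuoi_pairs numbers)

-- ===== PRECONDITION & SPEC =====
def Spec_find_unique_odd_index (numbers : List Int) (out : Option Int) : Prop := out = find_unique_odd_index_alt numbers
instance (numbers : List Int) (out : Option Int) : Decidable (Spec_find_unique_odd_index numbers out) := by unfold Spec_find_unique_odd_index; infer_instance

-- ===== CLAIM (what is proved, stated in full; the proofs are below) =====
def Claim_equal_find_unique_odd_index : Prop := ∀ (numbers : List Int), Dom_find_unique_odd_index numbers → Spec_find_unique_odd_index numbers (find_unique_odd_index numbers)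

-- ===== LEMMAS AND PROOFS =====

-- the candidate predicate shared by both analyses: odd value occurring exactly once
def pvQ (numbers : List Int) (v : Int) : Bool :=
  PySem.Int.mod v 2 == 1 && (PySem.List.count numbers v : Int) == 1

theorem pvQ_count {numbers : List Int} {v : Int} (h : pvQ numbers v = true) :
    numbers.count v = 1 := by
  unfold pvQ at h
  simp only [Bool.and_eq_true, beq_iff_eq] at h
  exact_mod_cast h.2

-- the unique occurrence of a count-1 value is its first occurrence
theorem pvIndex {xs : List Int} {m : Int} {k : Nat} (hk : k < xs.length)
    (he : xs[k] = m) (hc : xs.count m = 1) :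
    PySem.List.index? xs m = some k := by
  induction xs generalizing k with
  | nil => simp at hk
  | cons x t ih =>
    cases k with
    | zero =>
      simp at he; subst he
      exact PySem.List.index?_cons_self x t
    | succ k =>
      have hk' : k < t.length := by simpa using hk
      have he' : t[k] = m := by simpa using he
      have hx : x ≠ m := by
        intro hxm; subst hxm
        rw [List.count_cons_self] at hc
        have h0 : t.count x = 0 := by omega
        have hmem : x ∈ t := he' ▸ List.getElem_mem hk'
        have := List.count_pos_iff.mpr hmem
        omega
      have hc' : t.count m = 1 := by
        rwa [List.count_cons_of_ne hx] at hc
      rw [PySem.List.index?_cons_of_ne t hx, ih hk' he' hc']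
      rfl

-- values surviving A's loop test (any predicate on the element), in loop order
theorem pvSndFilter (R : Int → Bool) (xs : List Int) : ∀ s : Int,
    ((PySem.List.enumerate xs s).filter (fun p => R p.2)).map (fun p => p.2)
      = xs.filter R := by
  induction xs with
  | nil => intro s; simp [PySem.List.enumerate_nil]
  | cons x t ih =>
    intro s
    rw [PySem.List.enumerate_cons, List.filter_cons, List.filter_cons]
    by_cases hx : R x = true
    · simp only [hx, if_pos, List.map_cons, ih (s + 1)]
    · have hx' : R x = false := Bool.eq_false_iff.mpr hx
      simp only [hx', Bool.false_eq_true, if_false, ih (s + 1)]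

theorem pvKeysList (numbers : List Int) :
    ((PySem.List.enumerate numbers 0).filter (fun p => pvQ numbers p.2)).map (fun p => p.2)
      = numbers.filter (pvQ numbers) :=
  pvSndFilter (pvQ numbers) numbers 0

theorem pvNodupFilter (numbers : List Int) : (numbers.filter (pvQ numbers)).Nodup := by
  rw [List.nodup_iff_count_le_one]
  intro v
  by_cases hv : pvQ numbers v = true
  · rw [List.count_filter hv]; exact le_of_eq (pvQ_count hv)
  · have hnm : v ∉ numbers.filter (pvQ numbers) := fun hmem => hv (List.of_mem_filter hmem)
    simp [List.count_eq_zero.mpr hnm]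

theorem pvItemsA (numbers : List Int) :
    (fuoi_unique_odds numbers).items
      = ((PySem.List.enumerate numbers 0).filter (fun p => pvQ numbers p.2)).map
          (fun p => (p.2, p.1)) := by
  unfold fuoi_unique_odds
  have hstep : (fun (d : PySem.Dict Int Int) (p : Int × Int) =>
      if PySem.Int.mod p.2 2 == 1 then
        if (PySem.List.count numbers p.2 : Int) == 1 then d.insert p.2 p.1 else d
      else d)
      = (fun d p => if pvQ numbers p.2 then d.insert p.2 p.1 else d) := by
    funext d p
    unfold pvQ
    cases h1 : (PySem.Int.mod p.2 2 == 1) <;>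
      cases h2 : ((PySem.List.count numbers p.2 : Int) == 1) <;> simp
  rw [hstep]
  have heq := PySem.List.foldl_if_eq_foldl_filter
      (fun p : Int × Int => pvQ numbers p.2)
      (fun (d : PySem.Dict Int Int) (p : Int × Int) => d.insert p.2 p.1)
      (PySem.List.enumerate numbers 0) PySem.Dict.empty
  rw [heq]
  have hnd : (((PySem.List.enumerate numbers 0).filter (fun p => pvQ numbers p.2)).map
      (fun p : Int × Int => p.2)).Nodup := by
    rw [pvKeysList]; exact pvNodupFilter numbers
  have hfresh : ∀ a ∈ (PySem.List.enumerate numbers 0).filter (fun p => pvQ numbers p.2),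
      (PySem.Dict.empty : PySem.Dict Int Int).contains a.2 = false :=
    fun a _ => PySem.Dict.contains_empty a.2
  have hins := PySem.Dict.items_foldl_insert_fresh
      ((PySem.List.enumerate numbers 0).filter (fun p => pvQ numbers p.2))
      (fun p : Int × Int => p.2) (fun p : Int × Int => p.1)
      PySem.Dict.empty hfresh hnd
  rw [hins]
  rfl

theorem pvKeysA (numbers : List Int) :
    PySem.Dict.keys (fuoi_unique_odds numbers) = numbers.filter (pvQ numbers) := by
  show ((fuoi_unique_odds numbers).items).map (fun x => x.1) = _
  rw [pvItemsA, List.map_map]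
  exact pvKeysList numbers

theorem pvSizeA (numbers : List Int) :
    (fuoi_unique_odds numbers).size = (numbers.filter (pvQ numbers)).length := by
  have h := congrArg List.length (pvKeysA numbers)
  simpa [PySem.Dict.keys, PySem.Dict.size] using h

-- the stored index of any candidate m equals numbers.index(m)
theorem pvVal (numbers : List Int) {m : Int} (hm : m ∈ numbers.filter (pvQ numbers)) :
    (fuoi_unique_odds numbers).get? m = (PySem.List.index? numbers m).map (fun n => Int.ofNat n) := by
  have hm' : m ∈ ((PySem.List.enumerate numbers 0).filter
      (fun p => pvQ numbers p.2)).map (fun p => p.2) := by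
    rw [pvKeysList]; exact hm
  obtain ⟨p, hpL, hpm⟩ := List.mem_map.mp hm'
  have hpE : p ∈ PySem.List.enumerate numbers 0 := List.mem_of_mem_filter hpL
  have hpQ : pvQ numbers p.2 = true :=
    List.of_mem_filter (p := fun q : Int × Int => pvQ numbers q.2) hpL
  obtain ⟨k, hk, hpe⟩ := (PySem.List.mem_enumerate_iff numbers 0 p).mp hpE
  rw [hpm] at hpQ
  have hitem : (p.2, p.1) ∈ (fuoi_unique_odds numbers).items := by
    rw [pvItemsA]; exact List.mem_map.mpr ⟨p, hpL, rfl⟩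
  have hnd : (PySem.Dict.keys (fuoi_unique_odds numbers)).Nodup := by
    rw [pvKeysA]; exact pvNodupFilter numbers
  have hget := PySem.Dict.get?_of_mem_items (fuoi_unique_odds numbers) hitem hnd
  have hke : numbers[k] = m := by rw [hpe] at hpm; simpa using hpm
  have hidx : PySem.List.index? numbers m = some k :=
    pvIndex hk hke (pvQ_count hpQ)
  rw [hpm] at hget
  rw [hget, hidx]
  rw [hpe]
  simp [Int.ofNat_eq_natCast]

-- ---------- B-side analysis ----------

-- the scan's candidate predicate relative to the current pair list
def pvP (P : List (Int × Int)) (p : Int × Int) : Bool :=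
  PySem.Int.mod p.2 2 == 1 && (P.map Prod.snd).count p.2 == 1

-- dropping a whole value group can be pushed into find?
theorem pvFindFilter (v : Int) (q1 q2 : Int × Int → Bool)
    (hne : ∀ p : Int × Int, p.2 ≠ v → q1 p = q2 p)
    (hv : ∀ p : Int × Int, p.2 = v → q1 p = false) :
    ∀ l : List (Int × Int),
      l.find? q1 = (l.filter (fun p => decide (p.2 ≠ v))).find? q2 := by
  intro l
  induction l with
  | nil => rfl
  | cons x t ih =>
    by_cases hx : x.2 = v
    · have h1 : q1 x = false := hv x hx
      rw [List.find?_cons, h1, List.filter_cons]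
      simp only [hx, decide_not]
      simpa using ih
    · have h1 : q1 x = q2 x := hne x hx
      rw [List.find?_cons, List.filter_cons]
      simp only [hx, decide_not]
      cases hq : q2 x with
      | true => simp [h1, hq]
      | false => simp [h1, hq, ih]

-- values of the remaining pairs after dropping the group of v
theorem pvRestSnd (tl : List (Int × Int)) (v : Int) :
    (tl.filter (fun p => decide (p.2 ≠ v))).map Prod.snd
      = (tl.map Prod.snd).filter (fun w => decide (w ≠ v)) := by
  rw [List.filter_map]
  rfl

-- the scan is find? of the odd-and-singleton-group predicate
theorem pvScanFindAux : ∀ (n : Nat) (P : List (Int × Int)), P.length ≤ n →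
    fuoi_scan P = (P.find? (pvP P)).map Prod.fst := by
  intro n
  induction n with
  | zero =>
    intro P hP
    have hnil : P = [] := List.eq_nil_of_length_eq_zero (Nat.le_zero.mp hP)
    subst hnil; rw [fuoi_scan]; rfl
  | succ n ih =>
    intro P hP
    match P with
    | [] => rw [fuoi_scan]; rfl
    | (idx, v) :: tl =>
      rw [fuoi_scan]
      have hcount : ((((idx, v) :: tl).map Prod.snd).count v)
          = (tl.map Prod.snd).count v + 1 := by
        simp [List.count_cons_self]
      by_cases hg : (PySem.Int.mod v 2 == 1
          && ((tl.filter (fun p => decide (p.2 ≠ v))).length == tl.length)) = true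
      · -- group is odd and a singleton: the head satisfies the predicate
        rw [if_pos hg]
        obtain ⟨hodd, hlen⟩ := Bool.and_eq_true_iff.mp hg
        have hall : ∀ p ∈ tl, p.2 ≠ v := by
          have hlen' : (tl.filter (fun p => decide (p.2 ≠ v))).length = tl.length :=
            beq_iff_eq.mp hlen
          have := List.length_filter_eq_length_iff.mp hlen'
          intro p hp
          simpa using this p hp
        have hnot : v ∉ tl.map Prod.snd := by
          intro hv
          obtain ⟨p, hp, hpv⟩ := List.mem_map.mp hv
          exact hall p hp hpv
        have hhead : pvP ((idx, v) :: tl) (idx, v) = true := by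
          unfold pvP
          rw [Bool.and_eq_true_iff]
          refine ⟨hodd, ?_⟩
          rw [hcount, List.count_eq_zero.mpr hnot]
          rfl
        rw [List.find?_cons, hhead]
        rfl
      · -- group fails: the whole group fails the predicate and is dropped
        rw [if_neg hg]
        have hcase : (PySem.Int.mod v 2 == 1) = false ∨ v ∈ tl.map Prod.snd := by
          by_cases hodd : (PySem.Int.mod v 2 == 1) = true
          · right
            by_contra hnot
            apply hg
            rw [Bool.and_eq_true_iff]
            refine ⟨hodd, ?_⟩
            have hall : ∀ p ∈ tl, decide (p.2 ≠ v) = true := by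
              intro p hp
              simp only [decide_eq_true_eq]
              intro hpv
              exact hnot (List.mem_map.mpr ⟨p, hp, hpv⟩)
            rw [List.filter_eq_self.mpr hall]
            simp
          · left; exact Bool.not_eq_true _ ▸ (Bool.eq_false_iff.mpr hodd)
        have hheadF : ∀ p : Int × Int, p.2 = v → pvP ((idx, v) :: tl) p = false := by
          intro p hpv
          unfold pvP
          rw [hpv, hcount]
          rcases hcase with h | h
          · rw [h]; rfl
          · have hpos : 0 < (tl.map Prod.snd).count v := List.count_pos_iff.mpr h
            have h1 : ((tl.map Prod.snd).count v + 1 == 1) = false := by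
              rw [beq_eq_false_iff_ne]; omega
            rw [h1, Bool.and_false]
        have hne : ∀ p : Int × Int, p.2 ≠ v →
            pvP ((idx, v) :: tl) p = pvP (tl.filter (fun q => decide (q.2 ≠ v))) p := by
          intro p hpv
          unfold pvP
          congr 1
          rw [pvRestSnd, List.count_filter (by simpa using hpv)]
          simp only [List.map_cons]
          rw [List.count_cons_of_ne (Ne.symm hpv)]
        have hrest_le : (tl.filter (fun p => decide (p.2 ≠ v))).length ≤ n :=
          le_trans (List.length_filter_le _ _)
            (Nat.le_of_succ_le_succ (by simpa using hP))
        rw [List.find?_cons, hheadF (idx, v) rfl]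
        rw [ih _ hrest_le]
        rw [pvFindFilter v (pvP ((idx, v) :: tl))
              (pvP (tl.filter (fun q => decide (q.2 ≠ v)))) hne hheadF tl]

theorem pvScanFind (P : List (Int × Int)) :
    fuoi_scan P = (P.find? (pvP P)).map Prod.fst :=
  pvScanFindAux P.length P le_rfl

-- casting a Nat count to Int does not change the ==1 test
theorem pvCastBeq (c : Nat) : (((c : Int)) == 1) = (c == 1) := by
  cases hc : c == 1 with
  | true =>
    have h1 : c = 1 := beq_iff_eq.mp hc
    subst h1; rfl
  | false =>
    have h1 : c ≠ 1 := by simpa using hc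
    have h2 : (c : Int) ≠ 1 := by exact_mod_cast h1
    exact beq_eq_false_iff_ne.mpr h2

-- on the sorted pairs the scan predicate is the candidate predicate of the values
theorem pvPEq (numbers : List Int) :
    pvP (fuoi_pairs numbers) = fun p => pvQ numbers p.2 := by
  funext p
  have hPerm : (fuoi_pairs numbers).Perm (PySem.List.enumerate numbers) :=
    PySem.List.sorted_perm _ _ _
  have hsnd : ((fuoi_pairs numbers).map Prod.snd).Perm numbers := by
    have h := hPerm.map Prod.snd
    rwa [PySem.List.map_snd_enumerate] at h
  unfold pvP pvQ
  rw [hsnd.count_eq]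
  rw [pvCastBeq]
  rfl

-- the scan on the sorted pairs returns the max candidate's stored index
theorem pvAltEq (numbers : List Int) :
    find_unique_odd_index_alt numbers =
      match PySem.List.max? (numbers.filter (pvQ numbers)) (fun x => x) with
      | some m => (PySem.List.index? numbers m).map (fun n => Int.ofNat n)
      | none => none := by
  have hPerm : (fuoi_pairs numbers).Perm (PySem.List.enumerate numbers) :=
    PySem.List.sorted_perm _ _ _
  have hmemN : ∀ p ∈ fuoi_pairs numbers, p.2 ∈ numbers := by
    intro p hp
    obtain ⟨k, hk, hpe⟩ :=
      (PySem.List.mem_enumerate_iff numbers 0 p).mp (hPerm.mem_iff.mp hp)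
    rw [hpe]
    exact List.getElem_mem hk
  unfold find_unique_odd_index_alt
  rw [pvScanFind, pvPEq]
  cases hmx : PySem.List.max? (numbers.filter (pvQ numbers)) (fun x => x) with
  | none =>
    have hnil : numbers.filter (pvQ numbers) = [] :=
      (PySem.List.max?_eq_none_iff _ _).mp hmx
    have hnone : (fuoi_pairs numbers).find? (fun p => pvQ numbers p.2) = none := by
      rw [List.find?_eq_none]
      intro p hp hq
      have : p.2 ∈ numbers.filter (pvQ numbers) :=
        List.mem_filter.mpr ⟨hmemN p hp, hq⟩
      rw [hnil] at this
      exact absurd this (List.not_mem_nil)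
    rw [hnone]
    rfl
  | some m =>
    have hmF : m ∈ numbers.filter (pvQ numbers) := PySem.List.max?_mem hmx
    have hmQ : pvQ numbers m = true := List.of_mem_filter hmF
    have hmN : m ∈ numbers := List.mem_of_mem_filter hmF
    have hcnt : numbers.count m = 1 := pvQ_count hmQ
    obtain ⟨j, hidx⟩ :=
      Option.isSome_iff_exists.mp ((PySem.List.index?_isSome_iff _ _).mpr hmN)
    obtain ⟨hj, hjm, -⟩ := PySem.List.getElem_of_index?_eq_some hidx
    have hpmE : ((j : Int), m) ∈ PySem.List.enumerate numbers 0 :=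
      (PySem.List.mem_enumerate_iff numbers 0 _).mpr ⟨j, hj, by simp [hjm]⟩
    have hpmP : ((j : Int), m) ∈ fuoi_pairs numbers := hPerm.mem_iff.mpr hpmE
    have hsome : ((fuoi_pairs numbers).find? (fun p => pvQ numbers p.2)).isSome :=
      List.find?_isSome.mpr ⟨_, hpmP, hmQ⟩
    obtain ⟨p', hfind⟩ := Option.isSome_iff_exists.mp hsome
    have hq' : pvQ numbers p'.2 = true := by
      have h := List.find?_some (p := fun p : Int × Int => pvQ numbers p.2) hfind
      simpa using h
    have hp'P : p' ∈ fuoi_pairs numbers := List.mem_of_find?_eq_some hfind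
    have le1 : p'.2 ≤ m :=
      PySem.List.max?_isMax hmx p'.2 (List.mem_filter.mpr ⟨hmemN p' hp'P, hq'⟩)
    have le2 : m ≤ p'.2 := by
      obtain ⟨l₁, l₂, hPsplit, hl₁⟩ :=
        ((List.find?_eq_some_iff_append (b := p') (p := fun p : Int × Int => pvQ numbers p.2)
            (xs := fuoi_pairs numbers)).mp hfind).2
      have hpw : (fuoi_pairs numbers).Pairwise (fun a b : Int × Int => b.2 ≤ a.2) :=
        PySem.List.sorted_pairwise_rev _ _
      rw [hPsplit] at hpw hpmP
      rcases List.mem_append.mp hpmP with h1 | h2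
      · exact absurd hmQ (by simpa using hl₁ _ h1)
      · rcases List.mem_cons.mp h2 with heq | h3
        · have : p'.2 = m := by rw [← heq]
          exact le_of_eq this.symm
        · have := (List.pairwise_append.mp hpw).2.1
          exact List.rel_of_pairwise_cons this h3
    have hpe : p'.2 = m := le_antisymm le1 le2
    obtain ⟨k', hk', hp'e⟩ :=
      (PySem.List.mem_enumerate_iff numbers 0 p').mp (hPerm.mem_iff.mp hp'P)
    have hke : numbers[k'] = m := by
      have : p'.2 = numbers[k'] := by rw [hp'e]
      rw [← this, hpe]
    have hidx' : PySem.List.index? numbers m = some k' := pvIndex hk' hke hcnt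
    have hkj : k' = j := by
      rw [hidx] at hidx'
      exact (Option.some_inj.mp hidx').symm
    have hp1 : p'.1 = (j : Int) := by
      subst hkj
      rw [hp'e]
      simp
    rw [hfind]
    show some p'.1 = (PySem.List.index? numbers m).map (fun n => Int.ofNat n)
    simp only [hidx, hp1]
    rfl

-- ===== VERDICT (by name: the statement is the Claim_ definition above) =====
theorem find_unique_odd_index_spec : Claim_equal_find_unique_odd_index := by
  intro numbers _
  unfold Spec_find_unique_odd_index
  rw [pvAltEq]
  unfold find_unique_odd_index
  cases hc : numbers.filter (pvQ numbers) with
  | nil =>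
    have hs : (fuoi_unique_odds numbers).size = 0 := by rw [pvSizeA, hc]; rfl
    simp [hs, PySem.List.max?]
  | cons v t =>
    have hk : PySem.Dict.keys (fuoi_unique_odds numbers) = v :: t := by rw [pvKeysA, hc]
    cases t with
    | nil =>
      have hs : (fuoi_unique_odds numbers).size = 1 := by rw [pvSizeA, hc]; rfl
      have hval := pvVal numbers (m := v) (by rw [hc]; exact List.mem_cons_self ..)
      simp [hs, hk, hval, PySem.List.max?]
    | cons w t' =>
      have hs : 1 < (fuoi_unique_odds numbers).size := by rw [pvSizeA, hc]; simp
      rcases hmx : PySem.List.max? (v :: w :: t') (fun x : Int => x) with _ | m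
      · exact absurd ((PySem.List.max?_eq_none_iff _ _).mp hmx) (by simp)
      · have hval := pvVal numbers (m := m) (by rw [hc]; exact PySem.List.max?_mem hmx)
        simp [hs, hk, hmx, hval]
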